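-- pv_equiv track=rewrite | github.com/yuvals41/citetrack | apps/api/ai_visibility/services/content_analysis.py | _parse_robots_disallow_all
-- ===== SOURCE A (Python) =====
-- def _parse_robots_disallow_all(robots_text: str, bot_name: str) -> bool:
--     current_agents: list[str] = []
--     blocked = False
--     for raw_line in robots_text.splitlines():
--         line = raw_line.split("#", 1)[0].strip()
--         if not line or ":" not in line:
--             continue
--         key, value = [part.strip() for part in line.split(":", 1)]
--         lowered_key = key.lower()
--         if lowered_key == "user-agent":
--             current_agents = [agent.strip().lower() for agent in value.split()] or ["*"]
--             continue
--         if lowered_key == "disallow" and value == "/":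
--             normalized_agents = {agent.lower() for agent in current_agents}
--             if bot_name.lower() in normalized_agents or "*" in normalized_agents:
--                 blocked = True
--     return blocked
-- ===== SOURCE B (Python) =====
-- def _directive(raw_line):
--     """Parse one line into a (lowercased key, value) directive, or None."""
--     line = raw_line.split("#", 1)[0].strip()
--     if not line or ":" not in line:
--         return None
--     key, value = [part.strip() for part in line.split(":", 1)]
--     return key.lower(), value
--
--
-- def _blocks(directives):
--     """Group directives into (agents, body) blocks, one per User-agent header;
--     the leading block (before any header) has the empty agent list."""
--     blocks = [([], [])]
--     for key, value in directives:
--         if key == "user-agent":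
--             agents = [a.strip().lower() for a in value.split()] or ["*"]
--             blocks.append((agents, []))
--         else:
--             blocks[-1][1].append((key, value))
--     return blocks
--
--
-- def _parse_robots_disallow_all(robots_text: str, bot_name: str) -> bool:
--     directives = [d for d in map(_directive, robots_text.splitlines()) if d is not None]
--     target = bot_name.lower()
--     return any(
--         ("*" in agents or target in agents)
--         and any(key == "disallow" and value == "/" for key, value in body)
--         for agents, body in _blocks(directives)
--     )
-- ===== Notes on version B (the rewrite author's own statement) =====
-- stated objective: alternative
-- what changed: B replaces A's single stateful scan with a blocked flag by a staged parse: it groups the directives into a table of (agents, body) blocks delimited by User-agent headers, then decides with one per-block conjunction (header matches AND body contains 'Disallow: /'), instead of A's inline per-directive set-membership test flipping a flag.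
import Mathlib
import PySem

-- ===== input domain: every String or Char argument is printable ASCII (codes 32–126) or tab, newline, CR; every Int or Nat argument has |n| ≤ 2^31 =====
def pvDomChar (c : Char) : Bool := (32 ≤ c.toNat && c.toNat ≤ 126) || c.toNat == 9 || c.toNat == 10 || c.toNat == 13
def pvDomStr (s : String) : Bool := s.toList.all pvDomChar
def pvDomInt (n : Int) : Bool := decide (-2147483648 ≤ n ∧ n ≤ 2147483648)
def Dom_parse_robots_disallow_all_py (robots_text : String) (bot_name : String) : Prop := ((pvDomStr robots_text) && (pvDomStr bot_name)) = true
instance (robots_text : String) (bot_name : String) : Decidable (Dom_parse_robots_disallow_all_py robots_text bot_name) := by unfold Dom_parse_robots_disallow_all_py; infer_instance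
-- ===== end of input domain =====

-- B stages the work: group the directives into a table of (agents, body) blocks delimited by
-- User-agent headers, then decide with one per-block conjunction; same values as A, no speed claim.

-- ===== PORT A =====
-- pvAStep transliterates the body of A's for-loop; state = (current_agents, blocked).
-- raw_line.split("#", 1)[0] is ported with headD: splitting on the nonempty separator "#"
-- always yields `some` of a nonempty list, so neither splitMax? nor the [0] index can fail (exact).
def pvAStep (bot_name : String) (st : List String × Bool) (raw_line : String) : List String × Bool :=
  let line := PySem.Str.strip (((PySem.Str.splitMax? raw_line "#" 1).getD []).headD "")
  if line == "" || !(PySem.Str.isIn ":" line) then st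
  else
    match ((PySem.Str.splitMax? line ":" 1).getD []).map PySem.Str.strip with
    | [key, value] =>
      let lowered_key := PySem.Str.lower key
      if lowered_key == "user-agent" then
        let agents := (PySem.Str.split₀ value).map (fun agent => PySem.Str.lower (PySem.Str.strip agent))
        (if agents == [] then ["*"] else agents, st.2)
      else if lowered_key == "disallow" && value == "/" then
        let normalized : PySem.Set String := PySem.Set.ofList (st.1.map PySem.Str.lower)
        if normalized.contains (PySem.Str.lower bot_name) || normalized.contains "*" then (st.1, true)
        else st
      else st
    | _ => st  -- unreachable: ":" occurs in line, so line.split(":", 1) has exactly two parts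

def parse_robots_disallow_all_py (robots_text : String) (bot_name : String) : Bool :=
  ((PySem.Str.splitlines robots_text).foldl (pvAStep bot_name) ([], false)).2

-- ===== PORT B =====
-- pvDirective? transliterates Source B's _directive (None becomes none);
-- split("#", 1)[0] via headD as in port A (exact).
def pvDirective? (raw_line : String) : Option (String × String) :=
  let line := PySem.Str.strip (((PySem.Str.splitMax? raw_line "#" 1).getD []).headD "")
  if line != "" && PySem.Str.isIn ":" line then
    match ((PySem.Str.splitMax? line ":" 1).getD []).map PySem.Str.strip with
    | [key, value] => some (PySem.Str.lower key, value)
    | _ => none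
  else none

-- the agent list computed from a User-agent header value
def pvAgents (value : String) : List String :=
  if ((PySem.Str.split₀ value).map (fun agent => PySem.Str.lower (PySem.Str.strip agent))) == [] then ["*"]
  else (PySem.Str.split₀ value).map (fun agent => PySem.Str.lower (PySem.Str.strip agent))

-- blocks[-1][1].append((key, value)): append the directive to the body of the last block
def pvAppendLast (blocks : List (List String × List (String × String))) (kv : String × String) :
    List (List String × List (String × String)) :=
  match blocks with
  | [] => []
  | [b] => [(b.1, b.2 ++ [kv])]
  | b :: rest => b :: pvAppendLast rest kv

-- the body of _blocks' for-loop
def pvBlocksStep (blocks : List (List String × List (String × String))) (kv : String × String) :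
    List (List String × List (String × String)) :=
  if kv.1 == "user-agent" then blocks ++ [(pvAgents kv.2, [])]
  else pvAppendLast blocks kv

def pvBlocks (directives : List (String × String)) : List (List String × List (String × String)) :=
  directives.foldl pvBlocksStep [([], [])]

-- the per-block test of Source B's final any(...)
def pvMatched (target : String) (b : List String × List (String × String)) : Bool :=
  (b.1.contains "*" || b.1.contains target) && b.2.any (fun kv => kv.1 == "disallow" && kv.2 == "/")

def parse_robots_disallow_all_py_alt (robots_text : String) (bot_name : String) : Bool :=
  let directives := (PySem.Str.splitlines robots_text).filterMap pvDirective?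
  let target := PySem.Str.lower bot_name
  (pvBlocks directives).any (pvMatched target)

-- ===== PRECONDITION & SPEC =====
def Spec_parse_robots_disallow_all_py (robots_text : String) (bot_name : String) (out : Bool) : Prop := out = parse_robots_disallow_all_py_alt robots_text bot_name
instance (robots_text : String) (bot_name : String) (out : Bool) : Decidable (Spec_parse_robots_disallow_all_py robots_text bot_name out) := by unfold Spec_parse_robots_disallow_all_py; infer_instance

-- ===== CLAIM (what is proved, stated in full; the proofs are below) =====
def Claim_equal_parse_robots_disallow_all_py : Prop := ∀ (robots_text : String) (bot_name : String), Dom_parse_robots_disallow_all_py robots_text bot_name → Spec_parse_robots_disallow_all_py robots_text bot_name (parse_robots_disallow_all_py robots_text bot_name)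

-- ===== LEMMAS AND PROOFS =====

theorem pvLowerChar_idem (c : Char) :
    PySem.Chars.lowerChar (PySem.Chars.lowerChar c) = PySem.Chars.lowerChar c := by
  simp only [PySem.Chars.lowerChar, PySem.Chars.isupper]
  split_ifs with h1 h2 <;> try rfl
  exfalso
  simp only [Bool.and_eq_true, decide_eq_true_eq] at h1 h2
  have hA : (65 : Nat) ≤ c.toNat := Fin.mk_le_mk.mp h1.1
  have hZ : c.toNat ≤ 90 := Fin.mk_le_mk.mp h1.2
  have hv : (Char.ofNat (c.toNat + 32)).toNat = c.toNat + 32 := by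
    rw [Char.toNat_ofNat, if_pos]
    exact Or.inl (by omega)
  have h2' : (Char.ofNat (c.toNat + 32)).toNat ≤ 90 := Fin.mk_le_mk.mp h2.2
  rw [hv] at h2'
  omega

theorem pvLower_idem (s : String) :
    PySem.Str.lower (PySem.Str.lower s) = PySem.Str.lower s := by
  simp [PySem.Str.lower, String.toList_ofList, PySem.Chars.lower, List.map_map,
    Function.comp_def, pvLowerChar_idem]

theorem pvAgents_inv (value : String) :
    ∀ a ∈ pvAgents value, PySem.Str.lower a = a := by
  intro a ha
  unfold pvAgents at ha
  split at ha
  · rcases List.mem_singleton.mp ha with rfl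
    decide
  · rcases List.mem_map.mp ha with ⟨w, _, rfl⟩
    exact pvLower_idem _

-- A's per-line step, phrased through B's line parser
def pvADirStep (bot : String) (st : List String × Bool) (kv : String × String) : List String × Bool :=
  if kv.1 == "user-agent" then (pvAgents kv.2, st.2)
  else if kv.1 == "disallow" && kv.2 == "/" then
    (if (PySem.Set.ofList (st.1.map PySem.Str.lower)).contains (PySem.Str.lower bot)
        || (PySem.Set.ofList (st.1.map PySem.Str.lower)).contains "*" then (st.1, true)
     else st)
  else st

theorem pvStep_eq (bot : String) (st : List String × Bool) (l : String) :
    pvAStep bot st l = (pvDirective? l).elim st (pvADirStep bot st) := by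
  simp only [pvAStep, pvDirective?]
  generalize PySem.Str.strip (((PySem.Str.splitMax? l "#" 1).getD []).headD "") = s
  generalize List.map PySem.Str.strip ((PySem.Str.splitMax? s ":" 1).getD []) = parts
  cases hse : (s == "") <;> cases hin : PySem.Str.isIn ":" s <;>
    simp only [hse, bne, Bool.not_true, Bool.not_false, Bool.or_false, Bool.or_true,
      Bool.and_true, Bool.and_false, Bool.false_eq_true, if_false, if_true, Option.elim] <;>
    try rfl
  rcases parts with _ | ⟨a, _ | ⟨b, _ | _⟩⟩ <;> rfl

theorem pvLines_eq (bot : String) (lines : List String) (st : List String × Bool) :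
    lines.foldl (pvAStep bot) st = (lines.filterMap pvDirective?).foldl (pvADirStep bot) st := by
  induction lines generalizing st with
  | nil => rfl
  | cons l ls ih =>
    rw [List.foldl_cons, List.filterMap_cons, pvStep_eq]
    cases pvDirective? l <;> simp [Option.elim, ih]

theorem pvContains_ofList (l : List String) (x : String) :
    (PySem.Set.ofList l).contains x = l.contains x := by
  simp only [PySem.Set.contains]
  rw [Bool.eq_iff_iff]
  simp only [List.contains_iff_mem]
  exact PySem.Set.mem_ofList l x

theorem pvTest_eq (bot : String) (agents : List String)
    (hinv : ∀ a ∈ agents, PySem.Str.lower a = a) :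
    ((PySem.Set.ofList (agents.map PySem.Str.lower)).contains (PySem.Str.lower bot)
      || (PySem.Set.ofList (agents.map PySem.Str.lower)).contains "*")
    = (agents.contains "*" || agents.contains (PySem.Str.lower bot)) := by
  have hmap : agents.map PySem.Str.lower = agents :=
    (List.map_congr_left hinv).trans (List.map_id' agents)
  rw [hmap, pvContains_ofList, pvContains_ofList, Bool.or_comm]

theorem pvAppendLast_length (blocks : List (List String × List (String × String)))
    (kv : String × String) : (pvAppendLast blocks kv).length = blocks.length := by
  induction blocks with
  | nil => rfl
  | cons b rest ih =>
    cases rest with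
    | nil => rfl
    | cons c t => simpa [pvAppendLast] using ih

theorem pvFoldl_prepend (kvs : List (String × String))
    (b : List String × List (String × String))
    (l : List (List String × List (String × String))) (hl : l ≠ []) :
    kvs.foldl pvBlocksStep (b :: l) = b :: kvs.foldl pvBlocksStep l := by
  induction kvs generalizing l with
  | nil => rfl
  | cons kv rest ih =>
    rw [List.foldl_cons, List.foldl_cons]
    have hstep : pvBlocksStep (b :: l) kv = b :: pvBlocksStep l kv := by
      unfold pvBlocksStep
      split
      · simp
      · rcases l with _ | ⟨c, t⟩
        · exact absurd rfl hl
        · rfl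
    rw [hstep]
    apply ih
    unfold pvBlocksStep
    split
    · simp
    · intro h
      have := pvAppendLast_length l kv
      rw [h] at this
      exact hl (List.length_eq_zero_iff.mp this.symm)

theorem pvBlocksStep_ua (blocks : List (List String × List (String × String))) (kv : String × String)
    (h : (kv.1 == "user-agent") = true) :
    pvBlocksStep blocks kv = blocks ++ [(pvAgents kv.2, [])] := by
  unfold pvBlocksStep; rw [if_pos h]

theorem pvBlocksStep_other (blocks : List (List String × List (String × String))) (kv : String × String)
    (h : ¬ (kv.1 == "user-agent") = true) :
    pvBlocksStep blocks kv = pvAppendLast blocks kv := by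
  unfold pvBlocksStep; rw [if_neg h]

theorem pvADirStep_ua (bot : String) (st : List String × Bool) (kv : String × String)
    (h : (kv.1 == "user-agent") = true) :
    pvADirStep bot st kv = (pvAgents kv.2, st.2) := by
  unfold pvADirStep; rw [if_pos h]

theorem pvADirStep_dis (bot : String) (st : List String × Bool) (kv : String × String)
    (h : ¬ (kv.1 == "user-agent") = true) (h2 : (kv.1 == "disallow" && kv.2 == "/") = true) :
    pvADirStep bot st kv =
      (if (PySem.Set.ofList (st.1.map PySem.Str.lower)).contains (PySem.Str.lower bot)
          || (PySem.Set.ofList (st.1.map PySem.Str.lower)).contains "*" then (st.1, true) else st) := by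
  unfold pvADirStep; rw [if_neg h, if_pos h2]

theorem pvADirStep_skip (bot : String) (st : List String × Bool) (kv : String × String)
    (h : ¬ (kv.1 == "user-agent") = true) (h2 : ¬ (kv.1 == "disallow" && kv.2 == "/") = true) :
    pvADirStep bot st kv = st := by
  unfold pvADirStep; rw [if_neg h, if_neg h2]

-- once a block matches, it stays matched through the rest of the fold
theorem pvMatched_mono (target : String) (kvs : List (String × String))
    (agents : List String) (body : List (String × String))
    (h : pvMatched target (agents, body) = true) :
    (kvs.foldl pvBlocksStep [(agents, body)]).any (pvMatched target) = true := by
  induction kvs generalizing body with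
  | nil => simpa using h
  | cons kv rest ih =>
    rw [List.foldl_cons]
    by_cases hk : (kv.1 == "user-agent") = true
    · rw [pvBlocksStep_ua _ _ hk,
        show ([(agents, body)] : List _) ++ [(pvAgents kv.2, [])]
            = (agents, body) :: [(pvAgents kv.2, [])] from rfl,
        pvFoldl_prepend rest _ _ (by simp), List.any_cons, h, Bool.true_or]
    · rw [pvBlocksStep_other _ _ hk,
        show pvAppendLast [(agents, body)] kv = [(agents, body ++ [kv])] from rfl]
      apply ih
      unfold pvMatched at h ⊢
      simp only [List.any_append, List.any_cons, List.any_nil, Bool.or_false]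
      simp only [Bool.and_eq_true] at h
      rw [h.1, h.2]
      rfl

theorem pvMain (bot : String) (kvs : List (String × String)) :
    ∀ (agents : List String) (body : List (String × String)) (blocked : Bool),
      (∀ a ∈ agents, PySem.Str.lower a = a) →
      (pvMatched (PySem.Str.lower bot) (agents, body) = true → blocked = true) →
      (kvs.foldl (pvADirStep bot) (agents, blocked)).2
        = (blocked || (kvs.foldl pvBlocksStep [(agents, body)]).any (pvMatched (PySem.Str.lower bot))) := by
  induction kvs with
  | nil =>
    intro agents body blocked _ hside
    simp only [List.foldl_nil, List.any_cons, List.any_nil, Bool.or_false]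
    by_cases hm : pvMatched (PySem.Str.lower bot) (agents, body) = true
    · rw [hm, hside hm, Bool.true_or]
    · rw [Bool.not_eq_true] at hm
      rw [hm, Bool.or_false]
  | cons kv rest ih =>
    intro agents body blocked hinv hside
    rw [List.foldl_cons, List.foldl_cons]
    by_cases hk : (kv.1 == "user-agent") = true
    · rw [pvADirStep_ua bot _ _ hk, pvBlocksStep_ua _ _ hk,
        show ([(agents, body)] : List _) ++ [(pvAgents kv.2, [])]
            = (agents, body) :: [(pvAgents kv.2, [])] from rfl,
        pvFoldl_prepend rest _ _ (by simp), List.any_cons]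
      rw [ih (pvAgents kv.2) [] blocked (pvAgents_inv kv.2) (by intro h; simp [pvMatched] at h)]
      by_cases hm : pvMatched (PySem.Str.lower bot) (agents, body) = true
      · rw [hm, hside hm]
        simp
      · rw [Bool.not_eq_true] at hm
        rw [hm, Bool.false_or]
    · rw [pvBlocksStep_other _ _ hk,
        show pvAppendLast [(agents, body)] kv = [(agents, body ++ [kv])] from rfl]
      by_cases hd : (kv.1 == "disallow" && kv.2 == "/") = true
      · rw [pvADirStep_dis bot _ _ hk hd]
        rw [show ((agents, blocked) : List String × Bool).1 = agents from rfl, pvTest_eq bot agents hinv]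
        have hdis : (body ++ [kv]).any (fun p => p.1 == "disallow" && p.2 == "/") = true := by
          simp [List.any_append, hd]
        by_cases hmb : (agents.contains "*" || agents.contains (PySem.Str.lower bot)) = true
        · rw [if_pos hmb]
          rw [ih agents (body ++ [kv]) true hinv (fun _ => rfl)]
          have : (rest.foldl pvBlocksStep [(agents, body ++ [kv])]).any (pvMatched (PySem.Str.lower bot)) = true :=
            pvMatched_mono _ rest agents (body ++ [kv]) (by unfold pvMatched; rw [hmb, hdis]; rfl)
          rw [this, Bool.true_or, Bool.or_true]
        · rw [if_neg hmb]
          apply ih agents (body ++ [kv]) blocked hinv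
          intro h
          unfold pvMatched at h
          rw [Bool.not_eq_true] at hmb
          rw [hmb] at h
          simp at h
      · rw [pvADirStep_skip bot _ _ hk hd]
        apply ih agents (body ++ [kv]) blocked hinv
        intro h
        apply hside
        unfold pvMatched at h ⊢
        simp only [List.any_append, List.any_cons, List.any_nil, Bool.or_false, hd] at h
        exact h

-- ===== VERDICT (by name: the statement is the Claim_ definition above) =====
theorem parse_robots_disallow_all_py_spec : Claim_equal_parse_robots_disallow_all_py := by
  unfold Claim_equal_parse_robots_disallow_all_py
  intro robots_text bot_name _
  unfold Spec_parse_robots_disallow_all_py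
  unfold parse_robots_disallow_all_py parse_robots_disallow_all_py_alt pvBlocks
  rw [pvLines_eq, pvMain bot_name _ [] [] false (by simp) (by intro h; simp [pvMatched] at h)]
  simp
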